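-- pv_equiv track=rewrite | github.com/ManosL/KenKen-Solver-CSP | kenken.py | CanFilledLikeThat
-- ===== SOURCE A (Python) =====
-- def CanFilledLikeThat(Coords,Nums):
--     for index1 in list(range(0,len(Coords))):
--         (x1,y1) = Coords[index1]
--         for index2 in list(range(index1 + 1,len(Coords))):
--             (x2,y2) = Coords[index2]
--
--             if (x1 == x2 or y1 == y2) and Nums[index1] == Nums[index2]:
--                 return False
--
--     return True
-- ===== SOURCE B (Python) =====
-- def CanFilledLikeThat(Coords, Nums):
--     row_seen = set()
--     col_seen = set()
--     for i in range(len(Coords)):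
--         (x, y) = Coords[i]
--         v = Nums[i]
--         if (x, v) in row_seen or (y, v) in col_seen:
--             return False
--         row_seen.add((x, v))
--         col_seen.add((y, v))
--     return True
-- ===== Notes on version B (the rewrite author's own statement) =====
-- stated objective: faster
-- what changed: Replaces the all-pairs nested scan with a single pass that maintains hash sets of (row,value) and (col,value) pairs already seen, so each cell is checked against all earlier cells in O(1); Pre_ excludes Nums shorter than Coords, where each program raises IndexError unless its own scan order happens to hit a conflict (or run out of pairs) first.
-- outside the precondition, e.g. on CanFilledLikeThat([(0, 0), (1, 1)], []): A returns True, B raises IndexError; on CanFilledLikeThat([(0, 1), (0, 2), (9, 9)], [5, 5]): A returns False, B returns False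
import Mathlib
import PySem

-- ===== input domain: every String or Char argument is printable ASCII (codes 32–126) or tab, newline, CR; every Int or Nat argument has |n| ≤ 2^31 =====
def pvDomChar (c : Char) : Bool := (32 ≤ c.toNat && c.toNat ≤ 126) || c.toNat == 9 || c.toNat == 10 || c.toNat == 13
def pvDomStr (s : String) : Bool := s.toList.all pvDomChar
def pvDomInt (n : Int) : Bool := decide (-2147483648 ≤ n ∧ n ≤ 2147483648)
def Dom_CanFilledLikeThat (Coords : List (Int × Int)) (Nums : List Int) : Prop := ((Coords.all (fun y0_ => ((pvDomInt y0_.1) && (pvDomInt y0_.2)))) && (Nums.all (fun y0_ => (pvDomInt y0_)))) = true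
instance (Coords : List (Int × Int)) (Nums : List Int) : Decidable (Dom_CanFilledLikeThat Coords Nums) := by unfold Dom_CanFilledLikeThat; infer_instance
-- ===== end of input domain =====

-- B replaces A's O(n^2) all-pairs scan with one pass over the cells that keeps sets of
-- (row,value) and (col,value) pairs already seen (objective: faster, O(n)).

-- ===== PORT A =====
-- List accesses Coords[index1] / Coords[index2] always have the index in range (it comes
-- from range(len(Coords))), and Nums[index] is in range under Pre_, so getD is exact there.
def CanFilledLikeThat (Coords : List (Int × Int)) (Nums : List Int) : Bool :=
  !((List.range Coords.length).any fun index1 =>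
      let p1 := Coords.getD index1 (0, 0)
      (List.range' (index1 + 1) (Coords.length - (index1 + 1))).any fun index2 =>
        let p2 := Coords.getD index2 (0, 0)
        (p1.1 == p2.1 || p1.2 == p2.2) && (Nums.getD index1 0 == Nums.getD index2 0))

-- ===== PORT B =====
-- Nums[i] is in range under Pre_, so getD is exact there.
def pvAltLoop (Coords : List (Int × Int)) (Nums : List Int) (i : Nat)
    (rowSeen colSeen : PySem.Set (Int × Int)) : Bool :=
  if h : i < Coords.length then
    let p := Coords.getD i (0, 0)
    let v := Nums.getD i 0
    if PySem.Set.contains rowSeen (p.1, v) || PySem.Set.contains colSeen (p.2, v) then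
      false
    else
      pvAltLoop Coords Nums (i + 1) (PySem.Set.add rowSeen (p.1, v)) (PySem.Set.add colSeen (p.2, v))
  else
    true
termination_by Coords.length - i

def CanFilledLikeThat_alt (Coords : List (Int × Int)) (Nums : List Int) : Bool :=
  pvAltLoop Coords Nums 0 PySem.Set.empty PySem.Set.empty

-- ===== PRECONDITION & SPEC =====
-- Pre_ excludes Nums shorter than Coords: there each Python raises IndexError unless its own
-- scan order happens to meet a conflicting (or no) pair first, so return-vs-raise is an accident
-- of traversal order on that region.
def Pre_CanFilledLikeThat (Coords : List (Int × Int)) (Nums : List Int) : Prop :=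
  Coords.length ≤ Nums.length
instance (Coords : List (Int × Int)) (Nums : List Int) : Decidable (Pre_CanFilledLikeThat Coords Nums) := by unfold Pre_CanFilledLikeThat; infer_instance

def pvWitness_CanFilledLikeThat : (List (Int × Int)) × List Int :=
  ([((0 : Int), (0 : Int)), ((1 : Int), (1 : Int))], [(1 : Int), (2 : Int)])

def Spec_CanFilledLikeThat (Coords : List (Int × Int)) (Nums : List Int) (out : Bool) : Prop := out = CanFilledLikeThat_alt Coords Nums
instance (Coords : List (Int × Int)) (Nums : List Int) (out : Bool) : Decidable (Spec_CanFilledLikeThat Coords Nums out) := by unfold Spec_CanFilledLikeThat; infer_instance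

-- ===== CLAIM (what is proved, stated in full; the proofs are below) =====
def Claim_equal_CanFilledLikeThat : Prop := ∀ (Coords : List (Int × Int)) (Nums : List Int), Dom_CanFilledLikeThat Coords Nums → Pre_CanFilledLikeThat Coords Nums → Spec_CanFilledLikeThat Coords Nums (CanFilledLikeThat Coords Nums)

-- ===== LEMMAS AND PROOFS =====

-- cell accessors used only by the proofs
def pvX (Coords : List (Int × Int)) (i : Nat) : Int := (Coords.getD i (0, 0)).1
def pvY (Coords : List (Int × Int)) (i : Nat) : Int := (Coords.getD i (0, 0)).2
def pvV (Nums : List Int) (i : Nat) : Int := Nums.getD i 0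

-- the conflict relation both programs test
def pvBad (Coords : List (Int × Int)) (Nums : List Int) (k j : Nat) : Prop :=
  (pvX Coords k = pvX Coords j ∨ pvY Coords k = pvY Coords j) ∧ pvV Nums k = pvV Nums j

lemma canA_iff (Coords : List (Int × Int)) (Nums : List Int) :
    CanFilledLikeThat Coords Nums = true ↔
      ∀ k j, k < j → j < Coords.length → ¬ pvBad Coords Nums k j := by
  simp only [CanFilledLikeThat, Bool.not_eq_true', List.any_eq_false, List.any_eq_true,
    List.mem_range, List.mem_range'_1, Bool.and_eq_true, Bool.or_eq_true, beq_iff_eq,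
    pvBad, pvX, pvY, pvV]
  constructor
  · intro h k j hkj hj hbad
    exact (h k (by omega)) ⟨j, ⟨by omega, by omega⟩, hbad.1, hbad.2⟩
  · rintro h k hk ⟨j, ⟨hj1, hj2⟩, hb, hv⟩
    exact h k j (by omega) (by omega) ⟨hb, hv⟩

lemma pvAltLoop_iff (Coords : List (Int × Int)) (Nums : List Int) (i : Nat)
    (rs cs : PySem.Set (Int × Int)) :
    pvAltLoop Coords Nums i rs cs = true ↔
      ∀ j, i ≤ j → j < Coords.length →
        (pvX Coords j, pvV Nums j) ∉ rs ∧ (pvY Coords j, pvV Nums j) ∉ cs ∧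
          ∀ k, i ≤ k → k < j → ¬ pvBad Coords Nums k j := by
  generalize hfuel : Coords.length - i = fuel
  induction fuel generalizing i rs cs with
  | zero =>
    have hni : ¬ i < Coords.length := by omega
    rw [pvAltLoop, dif_neg hni]
    exact ⟨fun _ j h1 h2 => absurd h2 (by omega), fun _ => rfl⟩
  | succ m ih =>
    have hi : i < Coords.length := by omega
    rw [pvAltLoop, dif_pos hi]
    by_cases hmem : (PySem.Set.contains rs ((Coords.getD i (0, 0)).1, Nums.getD i 0) ||
        PySem.Set.contains cs ((Coords.getD i (0, 0)).2, Nums.getD i 0)) = true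
    · rw [if_pos hmem]
      simp only [Bool.or_eq_true] at hmem
      simp only [Bool.false_eq_true, false_iff, not_forall]
      refine ⟨i, le_rfl, hi, fun hR => ?_⟩
      obtain ⟨h1, h2, -⟩ := hR
      rcases hmem with hc | hc
      · exact h1 ((PySem.Set.contains_iff rs _).mp hc)
      · exact h2 ((PySem.Set.contains_iff cs _).mp hc)
    · rw [if_neg hmem]
      simp only [Bool.or_eq_true, not_or] at hmem
      have hnr : (pvX Coords i, pvV Nums i) ∉ rs :=
        fun hin => hmem.1 ((PySem.Set.contains_iff rs _).mpr hin)
      have hnc : (pvY Coords i, pvV Nums i) ∉ cs :=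
        fun hin => hmem.2 ((PySem.Set.contains_iff cs _).mpr hin)
      rw [ih (i + 1) _ _ (by omega)]
      constructor
      · intro H j hij hj
        rcases Nat.eq_or_lt_of_le hij with hji | hji
        · subst hji
          exact ⟨hnr, hnc, fun k hk1 hk2 => absurd (hk1.trans_lt hk2) (lt_irrefl _)⟩
        · obtain ⟨h1, h2, h3⟩ := H j hji hj
          rw [PySem.Set.mem_add] at h1 h2
          refine ⟨fun hin => h1 (Or.inl hin), fun hin => h2 (Or.inl hin), fun k hk1 hk2 => ?_⟩
          rcases Nat.eq_or_lt_of_le hk1 with hki | hki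
          · subst hki
            rintro ⟨hb | hb, hv⟩
            · exact h1 (Or.inr (by rw [Prod.mk.injEq]; exact ⟨hb.symm, hv.symm⟩))
            · exact h2 (Or.inr (by rw [Prod.mk.injEq]; exact ⟨hb.symm, hv.symm⟩))
          · exact h3 k hki hk2
      · intro H j hij hj
        obtain ⟨h1, h2, h3⟩ := H j (by omega) hj
        refine ⟨?_, ?_, fun k hk1 hk2 => h3 k (by omega) hk2⟩
        · rw [PySem.Set.mem_add]
          rintro (hin | heq)
          · exact h1 hin
          · rw [Prod.mk.injEq] at heq
            exact h3 i le_rfl (by omega) ⟨Or.inl heq.1.symm, heq.2.symm⟩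
        · rw [PySem.Set.mem_add]
          rintro (hin | heq)
          · exact h2 hin
          · rw [Prod.mk.injEq] at heq
            exact h3 i le_rfl (by omega) ⟨Or.inr heq.1.symm, heq.2.symm⟩
lemma canB_iff (Coords : List (Int × Int)) (Nums : List Int) :
    CanFilledLikeThat_alt Coords Nums = true ↔
      ∀ k j, k < j → j < Coords.length → ¬ pvBad Coords Nums k j := by
  rw [CanFilledLikeThat_alt, pvAltLoop_iff]
  constructor
  · intro h k j hkj hj
    exact (h j (Nat.zero_le j) hj).2.2 k (Nat.zero_le k) hkj
  · intro h j _ hj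
    exact ⟨by simp [PySem.Set.empty], by simp [PySem.Set.empty],
      fun k _ hk => h k j hk hj⟩

-- ===== VERDICT (by name: the statement is the Claim_ definition above) =====
theorem CanFilledLikeThat_spec : Claim_equal_CanFilledLikeThat := by
  intro Coords Nums _ _
  unfold Spec_CanFilledLikeThat
  rw [Bool.eq_iff_iff, canA_iff, canB_iff]
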